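-- pv_equiv track=rewrite | github.com/olewhale/trndwtchai | main2_copy.py | insert_transcription
-- ===== SOURCE A (Python) =====
-- def insert_transcription(extracted_data, output_data):
--     # Создаем словарь для быстрого поиска по shortCode
--     transcription_dict = {
--         t['shortCode']: t['transcription']
--         for t in output_data['transcriptions']
--     }
--
--     # Обновляем extracted_data
--     for item in extracted_data:
--         shortCode = item.get('shortCode')
--         if shortCode in transcription_dict:
--             item['transcription'] = transcription_dict[shortCode]
--
--     return extracted_data
-- ===== SOURCE B (Python) =====
-- # Index the items by shortCode once, then walk the transcriptions and update every matching item.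
-- def insert_transcription(extracted_data, output_data):
--     item_index = {}
--     for i, item in enumerate(extracted_data):
--         item_index.setdefault(item.get('shortCode'), []).append(i)
--
--     for t in output_data['transcriptions']:
--         tr = t['transcription']
--         sc = t['shortCode']
--         for i in item_index.get(sc, []):
--             extracted_data[i]['transcription'] = tr
--
--     return extracted_data
-- ===== Notes on version B (the rewrite author's own statement) =====
-- stated objective: alternative
-- what changed: B inverts the indexing: instead of A's shortCode->transcription dict probed per item, B builds an index from shortCode to the item positions and walks the transcriptions in order, overwriting matched items (so a later duplicate transcription naturally wins); Pre_ excludes only inputs where A raises KeyError (no 'transcriptions' key, or a transcription entry missing 'shortCode'/'transcription').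
import Mathlib
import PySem

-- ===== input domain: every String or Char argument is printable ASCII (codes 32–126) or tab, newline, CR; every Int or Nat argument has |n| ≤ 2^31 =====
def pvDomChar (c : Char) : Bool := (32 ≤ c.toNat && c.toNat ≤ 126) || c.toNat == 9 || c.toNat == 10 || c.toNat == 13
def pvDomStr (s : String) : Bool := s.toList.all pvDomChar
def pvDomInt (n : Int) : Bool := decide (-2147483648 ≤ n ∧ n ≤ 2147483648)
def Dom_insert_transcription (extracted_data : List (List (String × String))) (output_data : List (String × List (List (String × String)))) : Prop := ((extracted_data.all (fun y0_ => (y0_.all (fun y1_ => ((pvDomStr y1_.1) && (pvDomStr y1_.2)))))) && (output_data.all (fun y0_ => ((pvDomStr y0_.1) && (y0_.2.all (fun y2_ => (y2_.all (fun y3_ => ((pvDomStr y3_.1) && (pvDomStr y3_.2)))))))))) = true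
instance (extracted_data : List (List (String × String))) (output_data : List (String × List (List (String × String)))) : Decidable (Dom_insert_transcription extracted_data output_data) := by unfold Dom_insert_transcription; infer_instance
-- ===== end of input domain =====

-- B inverts the indexing (shortCode -> item positions instead of shortCode -> transcription);
-- not faster, an alternative decomposition. Both Pythons mutate extracted_data's item dicts in
-- place; the equivalence proved here is about the RETURN value (the ports are pure, in-place
-- mutation is rendered as positional update).

-- ===== PORT A =====
def insert_transcription (extracted_data : List (List (String × String))) (output_data : List (String × List (List (String × String)))) : List (List (String × String)) :=
  -- output_data['transcriptions'] : KeyError (excluded by Pre_) modelled by getD []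
  let trs := ((PySem.Dict.mk output_data).get? "transcriptions").getD []
  -- transcription_dict = {t['shortCode']: t['transcription'] for t in ...}; missing keys (KeyError)
  -- excluded by Pre_, modelled by getD ""
  let tdict := trs.foldl (fun d t =>
      d.insert (((PySem.Dict.mk t).get? "shortCode").getD "")
               (((PySem.Dict.mk t).get? "transcription").getD ""))
    (PySem.Dict.mk [])
  extracted_data.map (fun item =>
    match (PySem.Dict.mk item).get? "shortCode" with
    | none => item
    | some sc =>
      match tdict.get? sc with
      | none => item
      | some v => ((PySem.Dict.mk item).insert "transcription" v).items)

-- ===== PORT B =====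
def insert_transcription_alt (extracted_data : List (List (String × String))) (output_data : List (String × List (List (String × String)))) : List (List (String × String)) :=
  -- item_index.setdefault(item.get('shortCode'), []).append(i)  =  modify key [] (· ++ [i]);
  -- Python mutates the item dicts through the index; rendered here as positional update
  -- (pySetD/pyGetD at index i), exact for the return value.
  let item_index := (PySem.List.enumerate extracted_data).foldl
    (fun d p => d.modify ((PySem.Dict.mk p.2).get? "shortCode") [] (· ++ [p.1]))
    (PySem.Dict.mk [])
  let trs := ((PySem.Dict.mk output_data).get? "transcriptions").getD []
  trs.foldl (fun st t =>
    let tr := ((PySem.Dict.mk t).get? "transcription").getD ""   -- KeyError excluded by Pre_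
    let sc := ((PySem.Dict.mk t).get? "shortCode").getD ""
    (item_index.getD (some sc) []).foldl (fun st i =>
      PySem.List.pySetD st i
        (((PySem.Dict.mk (PySem.List.pyGetD st i [])).insert "transcription" tr).items)) st)
    extracted_data

-- ===== PRECONDITION & SPEC =====
-- Pre_ excludes exactly the inputs where the Python A raises KeyError: output_data without a
-- 'transcriptions' key, or a transcription entry missing 'shortCode' or 'transcription'.
def Pre_insert_transcription (extracted_data : List (List (String × String))) (output_data : List (String × List (List (String × String)))) : Prop :=
  ((PySem.Dict.mk output_data).get? "transcriptions").isSome = true ∧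
  ∀ t ∈ ((PySem.Dict.mk output_data).get? "transcriptions").getD [],
    ((PySem.Dict.mk t).get? "shortCode").isSome = true ∧
    ((PySem.Dict.mk t).get? "transcription").isSome = true
instance (extracted_data : List (List (String × String))) (output_data : List (String × List (List (String × String)))) : Decidable (Pre_insert_transcription extracted_data output_data) := by unfold Pre_insert_transcription; infer_instance

def pvWitness_insert_transcription : (List (List (String × String))) × (List (String × List (List (String × String)))) :=
  ([[("shortCode", "a")], [("shortCode", "b"), ("x", "y")]],
   [("transcriptions", [[("shortCode", "a"), ("transcription", "hello")]])])

def Spec_insert_transcription (extracted_data : List (List (String × String))) (output_data : List (String × List (List (String × String)))) (out : List (List (String × String))) : Prop := out = insert_transcription_alt extracted_data output_data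
instance (extracted_data : List (List (String × String))) (output_data : List (String × List (List (String × String)))) (out : List (List (String × String))) : Decidable (Spec_insert_transcription extracted_data output_data out) := by unfold Spec_insert_transcription; infer_instance

-- ===== CLAIM (what is proved, stated in full; the proofs are below) =====
def Claim_equal_insert_transcription : Prop := ∀ (extracted_data : List (List (String × String))) (output_data : List (String × List (List (String × String)))), Dom_insert_transcription extracted_data output_data → Pre_insert_transcription extracted_data output_data → Spec_insert_transcription extracted_data output_data (insert_transcription extracted_data output_data)

-- ===== LEMMAS AND PROOFS =====

-- the value both programs leave at an item: updated by the LAST matching transcription, if any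
def gmap (trs : List (List (String × String))) (item : List (String × String)) : List (String × String) :=
  match (PySem.Dict.mk item).get? "shortCode" with
  | none => item
  | some s =>
    match trs.reverse.find? (fun t => (((PySem.Dict.mk t).get? "shortCode").getD "") == s) with
    | some t => ((PySem.Dict.mk item).insert "transcription"
                   (((PySem.Dict.mk t).get? "transcription").getD "")).items
    | none => item

def upd (tr : String) (x : List (String × String)) : List (String × String) :=
  ((PySem.Dict.mk x).insert "transcription" tr).items

theorem upd_upd (tr tr' : String) (x : List (String × String)) : upd tr (upd tr' x) = upd tr x := by
  unfold upd
  rw [show PySem.Dict.mk ((PySem.Dict.mk x).insert "transcription" tr').items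
        = (PySem.Dict.mk x).insert "transcription" tr' from rfl,
      PySem.Dict.insert_insert_self]

theorem gmap_nil (item : List (String × String)) : gmap [] item = item := by
  unfold gmap
  cases (PySem.Dict.mk item).get? "shortCode" <;> simp

-- a fold of inserts is looked up by the LAST matching entry, i.e. the first in reverse
theorem get?_foldl_insert (key val : List (String × String) → String)
    (trs : List (List (String × String))) (d : PySem.Dict String String) (s : String) :
    (trs.foldl (fun d t => d.insert (key t) (val t)) d).get? s =
      match trs.reverse.find? (fun t => key t == s) with
      | some t => some (val t)
      | none => d.get? s := by
  induction trs generalizing d with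
  | nil => rfl
  | cons t ts ih =>
    simp only [List.foldl_cons, List.reverse_cons, List.find?_append, ih]
    cases hf : ts.reverse.find? (fun t => key t == s) with
    | some t' => simp
    | none =>
      simp only [List.find?_cons, List.find?_nil]
      cases hk : (key t == s) with
      | true =>
        have : s = key t := (beq_iff_eq.mp hk).symm
        simp [this]
      | false =>
        have : s ≠ key t := fun h => by simp [h] at hk
        simp [PySem.Dict.get?_insert, this]

theorem A_eq_map (ed : List (List (String × String))) (od : List (String × List (List (String × String)))) :
    insert_transcription ed od = ed.map (gmap (((PySem.Dict.mk od).get? "transcriptions").getD [])) := by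
  unfold insert_transcription
  apply List.map_congr_left
  intro item _
  unfold gmap
  cases hsc : (PySem.Dict.mk item).get? "shortCode" with
  | none => rfl
  | some s =>
    dsimp only
    rw [get?_foldl_insert (fun t => ((PySem.Dict.mk t).get? "shortCode").getD "")
      (fun t => ((PySem.Dict.mk t).get? "transcription").getD "")]
    cases hf : (((PySem.Dict.mk od).get? "transcriptions").getD []).reverse.find?
        (fun t => ((PySem.Dict.mk t).get? "shortCode").getD "" == s) with
    | some t' => simp
    | none => simp [PySem.Dict.get?]

-- membership in one bucket of the item index
theorem mem_item_index (ed : List (List (String × String))) (sc : String) (j : Int) :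
    (j ∈ (((PySem.List.enumerate ed).foldl
        (fun d p => d.modify ((PySem.Dict.mk p.2).get? "shortCode") [] (· ++ [p.1]))
        (PySem.Dict.mk [])).getD (some sc) []))
    ↔ ∃ k : Nat, ∃ _h : k < ed.length, j = (k : Int) ∧ (PySem.Dict.mk ed[k]).get? "shortCode" = some sc := by
  have hfold : (PySem.List.enumerate ed).foldl
        (fun d p => d.modify ((PySem.Dict.mk p.2).get? "shortCode") [] (· ++ [p.1]))
        (PySem.Dict.mk [])
      = ((PySem.List.enumerate ed).map (fun p => ((PySem.Dict.mk p.2).get? "shortCode", p.1))).foldl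
        (fun d q => d.modify q.1 [] (· ++ [q.2])) (PySem.Dict.mk []) := by
    rw [List.foldl_map]
  rw [hfold, PySem.Dict.getD_foldl_modify_append,
    show (({ items := [] } : PySem.Dict (Option String) (List Int)).getD (some sc) []) = [] from rfl,
    List.nil_append]
  constructor
  · intro h
    obtain ⟨q, hq, rfl⟩ := List.mem_map.mp h
    obtain ⟨hqmem, hqkey⟩ := List.mem_filter.mp hq
    obtain ⟨p, hp, rfl⟩ := List.mem_map.mp hqmem
    obtain ⟨k, hk, rfl⟩ := (PySem.List.mem_enumerate_iff ed 0 p).mp hp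
    exact ⟨k, hk, by simp, by simpa using hqkey⟩
  · rintro ⟨k, hk, rfl, hkey⟩
    apply List.mem_map.mpr
    refine ⟨((PySem.Dict.mk ed[k]).get? "shortCode", (0 : Int) + (k : Int)), ?_, by simp⟩
    apply List.mem_filter.mpr
    refine ⟨List.mem_map.mpr ⟨((0 : Int) + (k : Int), ed[k]), ?_, rfl⟩, by simpa using hkey⟩
    exact (PySem.List.mem_enumerate_iff ed 0 _).mpr ⟨k, hk, rfl⟩

-- the positional-update fold over in-range indices is a masked map
theorem foldl_pySetD_mask (tr : String) :
    ∀ (idxs : List Int) (st : List (List (String × String))),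
    (∀ i ∈ idxs, ∃ k : Nat, k < st.length ∧ i = (k : Int)) →
    idxs.foldl (fun st i =>
        PySem.List.pySetD st i
          (((PySem.Dict.mk (PySem.List.pyGetD st i [])).insert "transcription" tr).items)) st
      = st.mapIdx (fun j x => if ((j : Int) ∈ idxs) then upd tr x else x) := by
  intro idxs
  induction idxs with
  | nil =>
    intro st _
    exact (List.ext_getElem (by simp) (by intro j h h'; simp)).symm
  | cons i is ih =>
    intro st hrange
    obtain ⟨k, hk, rfl⟩ := hrange i (by simp : i ∈ i :: is)
    have hget : PySem.List.pyGetD st ((k : Nat) : Int) [] = st[k] := by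
      simp [PySem.List.pyGetD_natCast, List.getD_eq_getElem?_getD, hk]
    have hset : PySem.List.pySetD st ((k : Nat) : Int)
        (((PySem.Dict.mk (PySem.List.pyGetD st ((k : Nat) : Int) [])).insert "transcription" tr).items)
        = st.set k (upd tr st[k]) := by
      rw [hget]; simp [upd]
    simp only [List.foldl_cons, hset]
    rw [ih (st.set k (upd tr st[k])) (by
      intro i hi
      obtain ⟨k', hk', rfl⟩ := hrange i (by simp [hi])
      exact ⟨k', by simpa using hk', rfl⟩)]
    apply List.ext_getElem
    · simp
    · intro j hj hj'
      have hjlen : j < st.length := by simpa using hj'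
      simp only [List.getElem_mapIdx, List.getElem_set]
      by_cases hjk : j = k
      · subst hjk
        by_cases hmem : ((j : Int) ∈ is)
        · simp [hmem, upd_upd]
        · simp [hmem]
      · have hne : (k = j) = False := by
          simp only [eq_iff_iff, iff_false]
          exact fun h => hjk h.symm
        have hcast : ((j : Int) = (k : Int)) ↔ False := by
          simp [hjk]
        simp only [hne, if_false, List.mem_cons, hcast, false_or]

-- one transcription step over the characterised state
theorem step_eq (ed : List (List (String × String))) (done : List (List (String × String)))
    (t : List (String × String)) :
    ((((PySem.List.enumerate ed).foldl
        (fun d p => d.modify ((PySem.Dict.mk p.2).get? "shortCode") [] (· ++ [p.1]))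
        (PySem.Dict.mk [])).getD (some (((PySem.Dict.mk t).get? "shortCode").getD "")) []).foldl
      (fun st i =>
        PySem.List.pySetD st i
          (((PySem.Dict.mk (PySem.List.pyGetD st i [])).insert "transcription"
            (((PySem.Dict.mk t).get? "transcription").getD "")).items))
      (ed.map (gmap done)))
    = ed.map (gmap (done ++ [t])) := by
  set sc := ((PySem.Dict.mk t).get? "shortCode").getD "" with hsc
  set tr := ((PySem.Dict.mk t).get? "transcription").getD "" with htr
  set idxs := (((PySem.List.enumerate ed).foldl
      (fun d p => d.modify ((PySem.Dict.mk p.2).get? "shortCode") [] (· ++ [p.1]))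
      (PySem.Dict.mk [])).getD (some sc) []) with hidxs
  rw [foldl_pySetD_mask tr idxs (ed.map (gmap done)) (by
    intro i hi
    obtain ⟨k, hk, rfl, _⟩ := (mem_item_index ed sc i).mp hi
    exact ⟨k, by simpa using hk, rfl⟩)]
  apply List.ext_getElem
  · simp
  · intro j hj hj'
    have hjlen : j < ed.length := by simpa using hj'
    have hmem : ((j : Int) ∈ idxs) ↔ ((PySem.Dict.mk ed[j]).get? "shortCode" = some sc) := by
      rw [hidxs, mem_item_index]
      constructor
      · rintro ⟨k, hk, hjk, hkey⟩
        have : j = k := by exact_mod_cast hjk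
        subst this; exact hkey
      · intro hkey
        exact ⟨j, hjlen, rfl, hkey⟩
    simp only [List.getElem_mapIdx, List.getElem_map]
    cases hkey : (PySem.Dict.mk ed[j]).get? "shortCode" with
    | none =>
      have : ¬ ((j : Int) ∈ idxs) := by simp [hmem, hkey]
      rw [if_neg this]
      unfold gmap
      simp [hkey]
    | some s =>
      by_cases hs : s = sc
      · rw [if_pos (hmem.mpr (by rw [hkey, hs]))]
        have hpt : ((((PySem.Dict.mk t).get? "shortCode").getD "") == s) = true := by
          rw [← hsc, hs]; simp
        have hfind : ((done ++ [t]).reverse.find?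
            (fun t' => (((PySem.Dict.mk t').get? "shortCode").getD "") == s)) = some t := by
          rw [show (done ++ [t]).reverse = t :: done.reverse by simp]
          simp [hpt]
        conv_rhs => unfold gmap
        simp only [hkey, hfind]
        unfold gmap
        simp only [hkey]
        cases hf : done.reverse.find?
            (fun t' => (((PySem.Dict.mk t').get? "shortCode").getD "") == s) with
        | none => rfl
        | some t' =>
          exact upd_upd tr (((PySem.Dict.mk t').get? "transcription").getD "") ed[j]
      · have hnm : ¬ ((j : Int) ∈ idxs) := fun h => hs (by
          have := hmem.mp h
          rw [hkey] at this
          exact Option.some_inj.mp this)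
        rw [if_neg hnm]
        have hpt : ((((PySem.Dict.mk t).get? "shortCode").getD "") == s) = false := by
          rw [← hsc]
          exact beq_eq_false_iff_ne.mpr (fun h => hs h.symm)
        have hfind : ((done ++ [t]).reverse.find?
            (fun t' => (((PySem.Dict.mk t').get? "shortCode").getD "") == s))
            = done.reverse.find? (fun t' => (((PySem.Dict.mk t').get? "shortCode").getD "") == s) := by
          rw [show (done ++ [t]).reverse = t :: done.reverse by simp]
          simp [hpt]
        unfold gmap
        simp only [hkey, hfind]

-- B's outer fold, characterised against the processed prefix
theorem B_fold (ed : List (List (String × String))) :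
    ∀ (rest done : List (List (String × String))),
    rest.foldl (fun st t =>
        let tr := ((PySem.Dict.mk t).get? "transcription").getD ""
        let sc := ((PySem.Dict.mk t).get? "shortCode").getD ""
        ((((PySem.List.enumerate ed).foldl
            (fun d p => d.modify ((PySem.Dict.mk p.2).get? "shortCode") [] (· ++ [p.1]))
            (PySem.Dict.mk [])).getD (some sc) []).foldl
          (fun st i =>
            PySem.List.pySetD st i
              (((PySem.Dict.mk (PySem.List.pyGetD st i [])).insert "transcription" tr).items)) st))
      (ed.map (gmap done))
    = ed.map (gmap (done ++ rest)) := by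
  intro rest
  induction rest with
  | nil => intro done; simp
  | cons t ts ih =>
    intro done
    simp only [List.foldl_cons]
    rw [show ((((PySem.List.enumerate ed).foldl
          (fun d p => d.modify ((PySem.Dict.mk p.2).get? "shortCode") [] (· ++ [p.1]))
          (PySem.Dict.mk [])).getD (some (((PySem.Dict.mk t).get? "shortCode").getD "")) []).foldl
        (fun st i =>
          PySem.List.pySetD st i
            (((PySem.Dict.mk (PySem.List.pyGetD st i [])).insert "transcription"
              (((PySem.Dict.mk t).get? "transcription").getD "")).items))
        (ed.map (gmap done)))
      = ed.map (gmap (done ++ [t])) from step_eq ed done t]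
    rw [ih (done ++ [t])]
    simp

theorem B_eq_map (ed : List (List (String × String))) (od : List (String × List (List (String × String)))) :
    insert_transcription_alt ed od = ed.map (gmap (((PySem.Dict.mk od).get? "transcriptions").getD [])) := by
  unfold insert_transcription_alt
  have hid : ed = ed.map (gmap []) := by
    conv_lhs => rw [← List.map_id ed]
    exact List.map_congr_left (fun item _ => (gmap_nil item).symm)
  have h := B_fold ed (((PySem.Dict.mk od).get? "transcriptions").getD []) []
  rw [← hid, List.nil_append] at h
  exact h

-- ===== VERDICT (by name: the statement is the Claim_ definition above) =====
theorem insert_transcription_spec : Claim_equal_insert_transcription := by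
  intro ed od _hdom _hpre
  unfold Spec_insert_transcription
  rw [A_eq_map, B_eq_map]
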